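-- pv_equiv track=rewrite | github.com/mreishus/aoc | 2024/python2024/aoc/day02.py | is_safe2
-- ===== SOURCE A (Python) =====
-- def is_safe(level):
--     direction = None
--     last_seen = None
--     for item in level:
--         if last_seen is not None:
--             diff = item - last_seen
--             if diff == 0:
--                 return False
--
--             this_direction = diff > 0
--             if direction is not None and direction != this_direction:
--                 return False
--             direction = this_direction
--
--             if abs(diff) > 3:
--                 return False
--         last_seen = item
--     return True
--
-- def is_safe2(level):
--     if is_safe(level):
--         return True
--     for i in range(len(level)):
--         newlist = level[:i] + level[i+1:]
--         if is_safe(newlist):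
--             return True
--     return False
-- ===== SOURCE B (Python) =====
-- def _first_violation(xs):
--     """Index of the first adjacent pair that breaks the safety rules, or None."""
--     dirn = None
--     for i, (a, b) in enumerate(zip(xs, xs[1:])):
--         d = b - a
--         if d == 0 or abs(d) > 3 or (dirn is not None and (d > 0) != dirn):
--             return i
--         dirn = d > 0
--     return None
--
--
-- def is_safe2(level):
--     i = _first_violation(level)
--     if i is None:
--         return True
--     # only removing one of the three elements around the first bad pair can help
--     for j in (i - 1, i, i + 1):
--         if 0 <= j < len(level) and _first_violation(level[:j] + level[j + 1:]) is None:
--             return True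
--     return False
-- ===== Notes on version B (the rewrite author's own statement) =====
-- stated objective: faster
-- what changed: A retries the full safety scan after deleting every index (quadratic); B makes one linear scan to find the first unsafe adjacent pair and tests deletion only of the three elements around it, proved sufficient.
import Mathlib
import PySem

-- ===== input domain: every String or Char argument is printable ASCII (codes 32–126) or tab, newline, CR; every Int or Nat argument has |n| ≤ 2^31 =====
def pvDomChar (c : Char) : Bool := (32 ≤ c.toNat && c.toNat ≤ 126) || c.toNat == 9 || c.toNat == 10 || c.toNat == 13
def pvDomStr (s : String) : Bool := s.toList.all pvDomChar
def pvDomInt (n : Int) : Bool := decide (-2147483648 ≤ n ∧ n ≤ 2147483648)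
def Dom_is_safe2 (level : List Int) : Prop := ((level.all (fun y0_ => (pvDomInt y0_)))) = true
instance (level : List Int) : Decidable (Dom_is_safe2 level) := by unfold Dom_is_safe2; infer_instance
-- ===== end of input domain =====

-- B re-implements A's quadratic "try deleting every index" as a linear scan for the
-- first unsafe adjacent pair, testing deletion only of the three elements around it.

-- ===== PORT A =====
-- literal port of is_safe: loop with (direction, last_seen) state, early returns
def isSafeA : Option Bool → Option Int → List Int → Bool
  | _, _, [] => true
  | direction, last_seen, item :: rest =>
    match last_seen with
    | none => isSafeA direction (some item) rest
    | some ls =>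
      let diff := item - ls
      if diff = 0 then false
      else
        let this_direction := decide (0 < diff)
        if (match direction with | some d => d != this_direction | none => false) then false
        else if 3 < |diff| then false
        else isSafeA (some this_direction) (some item) rest

-- the 'for i in range(len(level))' loop with early return True
def isSafe2LoopA (level : List Int) : List Int → Bool
  | [] => false
  | i :: rest =>
    let newlist := PySem.List.slice level none (some i) ++ PySem.List.slice level (some (i + 1)) none
    if isSafeA none none newlist then true else isSafe2LoopA level rest

def is_safe2 (level : List Int) : Bool :=
  if isSafeA none none level then true
  else isSafe2LoopA level (PySem.List.pyRange 0 (level.length : Int) 1)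

-- ===== PORT B =====
-- the if-condition of _first_violation's loop body
def vioBad (dirn : Option Bool) (d : Int) : Bool :=
  (d == 0) || decide (3 < |d|) || (match dirn with | some dr => decide (0 < d) != dr | none => false)

-- 'for i, (a, b) in enumerate(zip(xs, xs[1:]))' with early return i
def vioAuxB : Option Bool → List (Int × (Int × Int)) → Option Int
  | _, [] => none
  | dirn, (i, ab) :: rest =>
    let d := ab.2 - ab.1
    if vioBad dirn d then some i else vioAuxB (some (decide (0 < d))) rest

def firstViolationB (xs : List Int) : Option Int :=
  vioAuxB none (PySem.List.enumerate (xs.zip (PySem.List.slice xs (some 1) none)) 0)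

-- 'for j in (i-1, i, i+1)' with the bounds guard and early return True
def tryCandsB (level : List Int) : List Int → Bool
  | [] => false
  | j :: rest =>
    if 0 ≤ j ∧ j < (level.length : Int) ∧
        firstViolationB (PySem.List.slice level none (some j) ++ PySem.List.slice level (some (j + 1)) none) = none
    then true else tryCandsB level rest

def is_safe2_alt (level : List Int) : Bool :=
  match firstViolationB level with
  | none => true
  | some i => tryCandsB level [i - 1, i, i + 1]

-- ===== PRECONDITION & SPEC =====
def Spec_is_safe2 (level : List Int) (out : Bool) : Prop := out = is_safe2_alt level
instance (level : List Int) (out : Bool) : Decidable (Spec_is_safe2 level out) := by unfold Spec_is_safe2; infer_instance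

-- ===== CLAIM (what is proved, stated in full; the proofs are below) =====
def Claim_equal_is_safe2 : Prop := ∀ (level : List Int), Dom_is_safe2 level → Spec_is_safe2 level (is_safe2 level)

-- ===== LEMMAS AND PROOFS =====

-- the safe ranges for one difference, and goodness of a difference list
def rngD (s : Bool) (d : Int) : Prop := if s then 1 ≤ d ∧ d ≤ 3 else -3 ≤ d ∧ d ≤ -1
def goodD (s : Bool) (ds : List Int) : Prop := ∀ d ∈ ds, rngD s d
def okD : Option Bool → List Int → Prop
  | none, ds => goodD true ds ∨ goodD false ds
  | some s, ds => goodD s ds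

def diffsL : List Int → List Int
  | [] => []
  | [_] => []
  | a :: b :: t => (b - a) :: diffsL (b :: t)


-- basic facts about rngD / goodD / okD
theorem goodD_cons (s : Bool) (d : Int) (ds : List Int) :
    goodD s (d :: ds) ↔ rngD s d ∧ goodD s ds := by
  simp [goodD]

theorem rngD_self (d : Int) (h1 : d ≠ 0) (h2 : |d| ≤ 3) : rngD (decide (0 < d)) d := by
  rw [abs_le] at h2
  by_cases h : 0 < d <;> simp [h, rngD] <;> omega

theorem rngD_sign (s : Bool) (d : Int) (h : rngD s d) : decide (0 < d) = s := by
  cases s <;> simp [rngD] at h <;> simp <;> omega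

theorem bad_not_rng (dirn : Option Bool) (d : Int) (s' : Bool)
    (h : vioBad dirn d = true) (hd : dirn = none ∨ dirn = some s') : ¬ rngD s' d := by
  intro hr
  have hsg := rngD_sign _ _ hr
  cases dirn with
  | none =>
    simp [vioBad] at h
    rcases h with h | h
    · cases s' <;> simp [rngD] at hr <;> omega
    · rw [lt_abs] at h; cases s' <;> simp [rngD] at hr <;> omega
  | some s =>
    have hss : s = s' := by simpa using hd
    subst hss
    simp [vioBad] at h
    rcases h with (h | h) | h
    · cases s <;> simp [rngD] at hr <;> omega
    · rw [lt_abs] at h; cases s <;> simp [rngD] at hr <;> omega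
    · rw [hsg] at h; exact h rfl

theorem not_okD_of_bad (dirn : Option Bool) (d : Int) (ds : List Int)
    (h : vioBad dirn d = true) : ¬ okD dirn (d :: ds) := by
  intro hok
  cases dirn with
  | none =>
    rcases hok with hg | hg
    · exact bad_not_rng none d true h (Or.inl rfl) (hg d (by simp))
    · exact bad_not_rng none d false h (Or.inl rfl) (hg d (by simp))
  | some s =>
    simp only [okD] at hok
    exact bad_not_rng (some s) d s h (Or.inr rfl) (hok d (by simp))
theorem not_bad_facts (dirn : Option Bool) (d : Int) (h : vioBad dirn d = false) :
    d ≠ 0 ∧ |d| ≤ 3 ∧ (∀ s0, dirn = some s0 → decide (0 < d) = s0) := by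
  cases dirn with
  | none =>
    simp [vioBad] at h
    exact ⟨h.1, h.2, by simp⟩
  | some s =>
    simp [vioBad] at h
    obtain ⟨⟨h1, h2⟩, h3⟩ := h
    exact ⟨h1, h2, by simpa using h3⟩
theorem okD_cons_of_not_bad (dirn : Option Bool) (d : Int) (ds : List Int)
    (h : vioBad dirn d = false) : (okD dirn (d :: ds) ↔ okD (some (decide (0 < d))) ds) := by
  obtain ⟨h1, h2, h3⟩ := not_bad_facts dirn d h
  have hr : rngD (decide (0 < d)) d := rngD_self d h1 h2
  cases dirn with
  | none =>
    simp only [okD]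
    constructor
    · rintro (hg | hg) <;> rw [goodD_cons] at hg <;>
        rw [rngD_sign _ _ hg.1] <;> exact hg.2
    · intro hg
      by_cases hp : 0 < d
      · left; rw [goodD_cons]; simp [hp] at hr hg; exact ⟨hr, hg⟩
      · right; rw [goodD_cons]; simp [hp] at hr hg; exact ⟨hr, hg⟩
  | some s =>
    have hs := h3 s rfl
    simp only [okD, goodD_cons, ← hs]
    exact and_iff_right hr

theorem vio_none_iff : ∀ (ps : List (Int × Int)) (dirn : Option Bool) (k : Int),
    vioAuxB dirn (PySem.List.enumerate ps k) = none ↔ okD dirn (ps.map (fun p => p.2 - p.1)) := by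
  intro ps
  induction ps with
  | nil =>
    intro dirn k
    cases dirn <;> simp [PySem.List.enumerate_nil, vioAuxB, okD, goodD]
  | cons ab t ih =>
    intro dirn k
    obtain ⟨a, b⟩ := ab
    rw [PySem.List.enumerate_cons]
    cases hbad : vioBad dirn (b - a) with
    | true =>
      simp only [vioAuxB, hbad, if_true, List.map_cons]
      constructor
      · intro h; simp at h
      · intro h; exact absurd h (not_okD_of_bad dirn (b - a) _ hbad)
    | false =>
      simp only [vioAuxB, hbad, Bool.false_eq_true, if_false, List.map_cons]
      rw [ih (some (decide (0 < b - a))) (k + 1)]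
      exact (okD_cons_of_not_bad dirn (b - a) _ hbad).symm

-- characterisation of a returned index: a good prefix followed by a bad difference
theorem vio_some : ∀ (ps : List (Int × Int)) (dirn : Option Bool) (k i : Int),
    vioAuxB dirn (PySem.List.enumerate ps k) = some i →
    ∃ pre d post s, ps.map (fun p => p.2 - p.1) = pre ++ d :: post ∧
      i = k + pre.length ∧ (∀ e ∈ pre, rngD s e) ∧
      (∀ s0, dirn = some s0 → s = s0) ∧
      (dirn = none → pre = [] → (d = 0 ∨ 3 < |d|)) ∧
      (d = 0 ∨ 3 < |d| ∨ decide (0 < d) ≠ s) := by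
  intro ps
  induction ps with
  | nil =>
    intro dirn k i h
    simp [PySem.List.enumerate_nil, vioAuxB] at h
  | cons ab t ih =>
    intro dirn k i h
    obtain ⟨a, b⟩ := ab
    rw [PySem.List.enumerate_cons] at h
    cases hbad : vioBad dirn (b - a) with
    | true =>
      simp only [vioAuxB, hbad, if_true, Option.some.injEq] at h
      subst h
      refine ⟨[], b - a, t.map (fun p => p.2 - p.1),
        (match dirn with | some s0 => s0 | none => decide (0 < b - a)), by simp, by simp, by simp,
        ?_, ?_, ?_⟩
      · intro s0 hd; subst hd; rfl
      · intro hd _; subst hd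
        simpa [vioBad] using hbad
      · cases dirn with
        | none =>
          have : (b - a) = 0 ∨ 3 < |b - a| := by simpa [vioBad] using hbad
          tauto
        | some s0 =>
          have : ((b - a) = 0 ∨ 3 < |b - a|) ∨ ¬ decide (0 < b - a) = s0 := by
            simpa [vioBad] using hbad
          tauto
    | false =>
      simp only [vioAuxB, hbad, Bool.false_eq_true, if_false] at h
      obtain ⟨pre', d', post', s, hmap, hi, hpre, hdir, _, hbd⟩ :=
        ih (some (decide (0 < b - a))) (k + 1) i h
      have hs : s = decide (0 < b - a) := hdir _ rfl
      obtain ⟨h1, h2, _⟩ := not_bad_facts dirn (b - a) hbad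
      refine ⟨(b - a) :: pre', d', post', s, by simp [hmap], by simp [hi]; omega, ?_, ?_, by simp, hbd⟩
      · intro e he
        rcases List.mem_cons.mp he with rfl | he'
        · rw [hs]; exact rngD_self _ h1 h2
        · exact hpre e he'
      · intro s0 hd
        rw [hs]
        exact (not_bad_facts dirn (b - a) hbad).2.2 s0 hd

theorem dl_zip : ∀ xs : List Int, (xs.zip xs.tail).map (fun p : Int × Int => p.2 - p.1) = diffsL xs := by
  intro xs
  induction xs with
  | nil => rfl
  | cons a t ih =>
    cases t with
    | nil => rfl
    | cons b t' =>
      simp only [List.tail_cons, List.zip_cons_cons, List.map_cons, diffsL]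
      simpa using ih

theorem fv_none_iff (xs : List Int) : firstViolationB xs = none ↔ okD none (diffsL xs) := by
  unfold firstViolationB
  rw [PySem.List.slice_from_one, vio_none_iff, dl_zip]

theorem fv_some_char (xs : List Int) (i : Int) (h : firstViolationB xs = some i) :
    ∃ pre d post s, diffsL xs = pre ++ d :: post ∧
      i = (pre.length : Int) ∧ (∀ e ∈ pre, rngD s e) ∧
      (pre = [] → (d = 0 ∨ 3 < |d|)) ∧
      (d = 0 ∨ 3 < |d| ∨ decide (0 < d) ≠ s) := by
  unfold firstViolationB at h
  rw [PySem.List.slice_from_one] at h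
  obtain ⟨pre, d, post, s, hmap, hi, hpre, _, habs, hbd⟩ := vio_some _ none 0 i h
  rw [dl_zip] at hmap
  exact ⟨pre, d, post, s, hmap, by omega, hpre, habs rfl, hbd⟩

-- A's scanner agrees with the same characterisation
theorem isSafeA_step (dirn : Option Bool) (prev x : Int) (t : List Int) :
    isSafeA dirn (some prev) (x :: t) =
      (if vioBad dirn (x - prev) then false else isSafeA (some (decide (0 < x - prev))) (some x) t) := by
  show (if x - prev = 0 then false
        else if (match dirn with | some d => d != decide (0 < x - prev) | none => false) = true then false
        else if 3 < |x - prev| then false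
        else isSafeA (some (decide (0 < x - prev))) (some x) t) = _
  by_cases h0 : x - prev = 0
  · have hb : vioBad dirn (x - prev) = true := by
      cases dirn <;> simp [vioBad, h0]
    rw [if_pos h0, hb]
    simp
  · rw [if_neg h0]
    cases hm : (match dirn with | some d => d != decide (0 < x - prev) | none => false) with
    | true =>
      have hb : vioBad dirn (x - prev) = true := by
        cases dirn with
        | none => simp at hm
        | some s =>
          simp only [vioBad, Bool.or_eq_true]
          exact Or.inr (bne_iff_ne.mpr (Ne.symm (bne_iff_ne.mp hm)))
      rw [hb]
      simp
    | false =>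
      rw [if_neg (by simp)]
      by_cases h3 : 3 < |x - prev|
      · have hb : vioBad dirn (x - prev) = true := by
          simp only [vioBad, Bool.or_eq_true]
          exact Or.inl (Or.inr (by simpa using h3))
        rw [if_pos h3, hb]
        simp
      · have hb : vioBad dirn (x - prev) = false := by
          cases dirn with
          | none => simp [vioBad, h0, h3]
          | some s =>
            have hs : s = decide (0 < x - prev) := by simpa using hm
            simp [vioBad, h0, h3, hs]
        rw [if_neg h3, hb]
        simp
theorem isSafeA_char : ∀ (xs : List Int) (dirn : Option Bool) (prev : Int),
    isSafeA dirn (some prev) xs = true ↔ okD dirn (diffsL (prev :: xs)) := by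
  intro xs
  induction xs with
  | nil =>
    intro dirn prev
    cases dirn <;> simp [isSafeA, diffsL, okD, goodD]
  | cons x t ih =>
    intro dirn prev
    rw [isSafeA_step]
    have hd : diffsL (prev :: x :: t) = (x - prev) :: diffsL (x :: t) := rfl
    rw [hd]
    cases hbad : vioBad dirn (x - prev) with
    | true =>
      rw [if_pos rfl]
      constructor
      · intro h; simp at h
      · intro h; exact absurd h (not_okD_of_bad dirn (x - prev) _ hbad)
    | false =>
      rw [if_neg (by simp)]
      rw [ih (some (decide (0 < x - prev))) x]
      exact (okD_cons_of_not_bad dirn (x - prev) _ hbad).symm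

theorem safeA_iff (xs : List Int) : isSafeA none none xs = true ↔ okD none (diffsL xs) := by
  cases xs with
  | nil => simp [isSafeA, diffsL, okD, goodD]
  | cons x t =>
    show isSafeA none (some x) t = true ↔ _
    exact isSafeA_char t none x

theorem safeA_eq_fv (xs : List Int) : isSafeA none none xs = true ↔ firstViolationB xs = none := by
  rw [safeA_iff, fv_none_iff]

-- diff-list decomposition back to the original list
theorem diffsL_cons_ne_nil (c : Int) (w : List Int) (h : w ≠ []) :
    diffsL (c :: w) = (w.head h - c) :: diffsL w := by
  cases w with
  | nil => exact absurd rfl h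
  | cons b t => rfl

theorem diffsL_decomp : ∀ (pre : List Int) (xs : List Int) (d : Int) (post : List Int),
    diffsL xs = pre ++ d :: post →
    ∃ u a b v, xs = u ++ a :: b :: v ∧ u.length = pre.length ∧ d = b - a ∧
      diffsL (u ++ [a]) = pre ∧ diffsL (b :: v) = post := by
  intro pre
  induction pre with
  | nil =>
    intro xs d post h
    match xs with
    | [] => simp [diffsL] at h
    | [a] => simp [diffsL] at h
    | a :: b :: t =>
      have hd : diffsL (a :: b :: t) = (b - a) :: diffsL (b :: t) := rfl
      rw [hd] at h
      obtain ⟨h1, h2⟩ := List.cons.injEq .. ▸ h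
      exact ⟨[], a, b, t, rfl, rfl, h1.symm, rfl, h2⟩
  | cons p pre' ih =>
    intro xs d post h
    match xs with
    | [] => simp [diffsL] at h
    | [a] => simp [diffsL] at h
    | a :: b :: t =>
      have hd : diffsL (a :: b :: t) = (b - a) :: diffsL (b :: t) := rfl
      rw [hd] at h
      simp only [List.cons_append, List.cons.injEq] at h
      obtain ⟨hp, hrest⟩ := h
      obtain ⟨u', a', b', v', hxs, hlen, hd', hpre', hpost'⟩ := ih (b :: t) d post hrest
      refine ⟨a :: u', a', b', v', by rw [List.cons_append, ← hxs], by simp [hlen], hd', ?_, hpost'⟩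
      have hne : u' ++ [a'] ≠ [] := by simp
      have hhead : (u' ++ [a']).head hne = b := by
        cases u' with
        | nil => simpa using (List.cons.injEq .. ▸ hxs).1.symm
        | cons w ws => simpa using ((List.cons.injEq .. ▸ hxs).1).symm
      rw [List.cons_append, diffsL_cons_ne_nil a (u' ++ [a']) hne, hhead, hpre', ← hp]

theorem sub_mem_diffsL : ∀ (t : List Int) (x y : Int) (w : List Int),
    (y - x) ∈ diffsL (t ++ x :: y :: w) := by
  intro t
  induction t with
  | nil => intro x y w; simp [diffsL]
  | cons c t' ih =>
    intro x y w
    have hne : t' ++ x :: y :: w ≠ [] := by simp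
    rw [List.cons_append, diffsL_cons_ne_nil c _ hne]
    exact List.mem_cons_of_mem _ (ih x y w)

-- killers: membership witnesses refuting goodness
theorem not_okD_none_of_abs (ds : List Int) (d : Int) (h2 : d ∈ ds) (hb : d = 0 ∨ 3 < |d|) :
    ¬ okD none ds := by
  intro hok
  have hx : ∃ s', rngD s' d := by
    rcases hok with hg | hg
    · exact ⟨true, hg d h2⟩
    · exact ⟨false, hg d h2⟩
  obtain ⟨s', hr⟩ := hx
  rcases hb with h | h
  · cases s' <;> simp [rngD] at hr <;> omega
  · rw [lt_abs] at h; cases s' <;> simp [rngD] at hr <;> omega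
theorem not_okD_none_of_two (ds : List Int) (e1 d : Int) (s : Bool)
    (h1 : e1 ∈ ds) (h2 : d ∈ ds) (hr : rngD s e1)
    (hb : d = 0 ∨ 3 < |d| ∨ decide (0 < d) ≠ s) : ¬ okD none ds := by
  intro hok
  have hok' : ∃ s', goodD s' ds := by
    rcases hok with h | h
    · exact ⟨true, h⟩
    · exact ⟨false, h⟩
  obtain ⟨s', hg⟩ := hok'
  have he1 := hg e1 h1
  have hd := hg d h2
  have hss : s' = s := by rw [← rngD_sign s' e1 he1, ← rngD_sign s e1 hr]
  subst hss
  have hsd := rngD_sign _ _ hd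
  rcases hb with h | h | h
  · cases s' <;> simp [rngD] at hd <;> omega
  · rw [lt_abs] at h; cases s' <;> simp [rngD] at hd <;> omega
  · exact h hsd
theorem main_far (xs : List Int) (i j : Int) (hv : firstViolationB xs = some i)
    (h0 : 0 ≤ j) (hn : j < (xs.length : Int)) (hfar : j < i - 1 ∨ i + 1 < j) :
    ¬ okD none (diffsL (xs.take j.toNat ++ xs.drop (j.toNat + 1))) := by
  intro hok
  obtain ⟨pre, d, post, s, hds, hi, hpre, habs, hbd⟩ := fv_some_char xs i hv
  obtain ⟨u, a, b, v, hxs, hlen, hdba, hpreu, hpost⟩ := diffsL_decomp pre xs d post hds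
  have hm : ((j.toNat : Int)) = j := Int.toNat_of_nonneg h0
  have hlenxs : xs.length = u.length + 2 + v.length := by
    rw [hxs]; simp; omega
  have hmlt : j.toNat < xs.length := by omega
  rcases hfar with hleft | hright
  · -- j < i - 1 : the removed element lies strictly inside the good prefix
    have hmu : j.toNat + 2 ≤ u.length := by omega
    have htk : xs.take j.toNat = u.take j.toNat :=
      hxs ▸ List.take_append_of_le_length (by omega)
    have hdr : xs.drop (j.toNat + 1) = u.drop (j.toNat + 1) ++ a :: b :: v := by
      rw [hxs, List.drop_append]
      have : j.toNat + 1 - u.length = 0 := by omega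
      rw [this, List.drop_zero]
    have hdru : u.drop (j.toNat + 1) = u[j.toNat + 1] :: u.drop (j.toNat + 2) :=
      List.drop_eq_getElem_cons (by omega)
    set c := u[j.toNat + 1] with hc
    -- d = b - a is still an adjacent difference of the shortened list
    have hdmem : d ∈ diffsL (xs.take j.toNat ++ xs.drop (j.toNat + 1)) := by
      rw [htk, hdr, hdru, hdba, ← List.append_assoc, List.append_cons (u.take j.toNat) c]
      have := sub_mem_diffsL (u.take j.toNat ++ [c] ++ u.drop (j.toNat + 2)) a b v
      simpa [List.append_assoc] using this
    -- an intact difference of the good prefix also survives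
    have hu1 : u = u.take (j.toNat + 1) ++ c :: u.drop (j.toNat + 2) := by
      rw [← hdru, List.take_append_drop]
    cases hrest : u.drop (j.toNat + 2) with
    | nil =>
      have he1pre : (a - c) ∈ pre := by
        rw [← hpreu, hu1, hrest]
        simpa using sub_mem_diffsL (u.take (j.toNat + 1)) c a []
      have he1mem : (a - c) ∈ diffsL (xs.take j.toNat ++ xs.drop (j.toNat + 1)) := by
        rw [htk, hdr, hdru, hrest]
        exact sub_mem_diffsL (u.take j.toNat) c a (b :: v)
      exact not_okD_none_of_two _ (a - c) d s he1mem hdmem (hpre _ he1pre) hbd hok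
    | cons c2 rest2 =>
      have he1pre : (c2 - c) ∈ pre := by
        rw [← hpreu, hu1, hrest]
        have := sub_mem_diffsL (u.take (j.toNat + 1)) c c2 (rest2 ++ [a])
        simpa [List.append_assoc] using this
      have he1mem : (c2 - c) ∈ diffsL (xs.take j.toNat ++ xs.drop (j.toNat + 1)) := by
        rw [htk, hdr, hdru, hrest]
        have := sub_mem_diffsL (u.take j.toNat) c c2 (rest2 ++ a :: b :: v)
        simpa [List.append_assoc] using this
      exact not_okD_none_of_two _ (c2 - c) d s he1mem hdmem (hpre _ he1pre) hbd hok
  · -- i + 1 < j : the removed element lies beyond the bad pair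
    have hmu : u.length + 2 ≤ j.toNat := by omega
    have htv : j.toNat - u.length - 2 < v.length := by omega
    obtain ⟨vt, c, vd, hsplit, hvt⟩ : ∃ vt c vd, v = vt ++ c :: vd ∧
        vt.length = j.toNat - u.length - 2 := by
      have hstep : j.toNat - u.length - 1 = (j.toNat - u.length - 2) + 1 := by omega
      refine ⟨v.take (j.toNat - u.length - 2), v[j.toNat - u.length - 2],
        v.drop (j.toNat - u.length - 1), ?_, by simp; omega⟩
      rw [hstep, ← List.drop_eq_getElem_cons htv, List.take_append_drop]
    set L1 := u ++ a :: b :: vt with hL1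
    have hL1len : L1.length = j.toNat := by
      rw [hL1]; simp; omega
    have hxs2 : xs = L1 ++ c :: vd := by
      rw [hxs, hsplit, hL1]
      simp [List.append_assoc]
    have htk : xs.take j.toNat = L1 := by
      rw [hxs2]; exact List.take_left' hL1len
    have hdr : xs.drop (j.toNat + 1) = vd := by
      rw [hxs2, List.append_cons L1]
      exact List.drop_left' (by simp [hL1len])
    have herased : xs.take j.toNat ++ xs.drop (j.toNat + 1) = u ++ a :: b :: (vt ++ vd) := by
      rw [htk, hdr, hL1]
      simp [List.append_assoc]
    have hdmem : d ∈ diffsL (xs.take j.toNat ++ xs.drop (j.toNat + 1)) := by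
      rw [herased, hdba]
      exact sub_mem_diffsL u a b _
    by_cases hpe : pre = []
    · exact not_okD_none_of_abs _ d hdmem (habs hpe) hok
    · have hune : u ≠ [] := by
        intro hu0
        apply hpe
        have : pre.length = 0 := by rw [← hlen, hu0]; rfl
        exact List.eq_nil_of_length_eq_zero this
      rcases List.eq_nil_or_concat u with hu0 | ⟨u', w, huw⟩
      · exact absurd hu0 hune
      · rw [List.concat_eq_append] at huw
        have he1pre : (a - w) ∈ pre := by
          rw [← hpreu, huw]
          simpa [List.append_assoc] using sub_mem_diffsL u' w a []
        have he1mem : (a - w) ∈ diffsL (xs.take j.toNat ++ xs.drop (j.toNat + 1)) := by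
          rw [herased, huw]
          have := sub_mem_diffsL u' w a (b :: (vt ++ vd))
          simpa [List.append_assoc] using this
        exact not_okD_none_of_two _ (a - w) d s he1mem hdmem (hpre _ he1pre) hbd hok

-- the slice expression both ports use
theorem erased_eq (xs : List Int) (j : Int) (h0 : 0 ≤ j) :
    PySem.List.slice xs none (some j) ++ PySem.List.slice xs (some (j + 1)) none =
      xs.take j.toNat ++ xs.drop (j.toNat + 1) := by
  rw [PySem.List.slice_to xs h0, PySem.List.slice_from xs (show (0:Int) ≤ j + 1 by omega)]
  have : (j + 1).toNat = j.toNat + 1 := by omega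
  rw [this]

theorem loopA_iff (level : List Int) : ∀ l : List Int,
    (isSafe2LoopA level l = true ↔ ∃ x ∈ l,
      isSafeA none none (PySem.List.slice level none (some x) ++ PySem.List.slice level (some (x + 1)) none) = true) := by
  intro l
  induction l with
  | nil => simp [isSafe2LoopA]
  | cons x rest ih =>
    simp only [isSafe2LoopA]
    by_cases h : isSafeA none none (PySem.List.slice level none (some x) ++ PySem.List.slice level (some (x + 1)) none) = true
    · simp [h]
    · simp [h, ih]

theorem cands_iff (level : List Int) : ∀ l : List Int,
    (tryCandsB level l = true ↔ ∃ jc ∈ l, 0 ≤ jc ∧ jc < (level.length : Int) ∧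
      firstViolationB (PySem.List.slice level none (some jc) ++ PySem.List.slice level (some (jc + 1)) none) = none) := by
  intro l
  induction l with
  | nil => simp [tryCandsB]
  | cons x rest ih =>
    simp only [tryCandsB]
    by_cases h : 0 ≤ x ∧ x < (level.length : Int) ∧
        firstViolationB (PySem.List.slice level none (some x) ++ PySem.List.slice level (some (x + 1)) none) = none
    · rw [if_pos h]
      constructor
      · intro _; exact ⟨x, List.mem_cons_self, h⟩
      · intro _; rfl
    · rw [if_neg h, ih]
      constructor
      · rintro ⟨jc, hm, hp⟩; exact ⟨jc, List.mem_cons_of_mem _ hm, hp⟩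
      · rintro ⟨jc, hm, hp⟩
        rcases List.mem_cons.mp hm with rfl | hm'
        · exact absurd hp h
        · exact ⟨jc, hm', hp⟩
theorem is_safe2_spec : Claim_equal_is_safe2 := by
  intro level _
  unfold Spec_is_safe2
  cases hfv : firstViolationB level with
  | none =>
    have hs : isSafeA none none level = true := (safeA_eq_fv level).mpr hfv
    simp [is_safe2, is_safe2_alt, hfv, hs]
  | some i =>
    have hs : isSafeA none none level = false := by
      cases h : isSafeA none none level with
      | false => rfl
      | true => rw [(safeA_eq_fv level).mp h] at hfv; simp at hfv
    have halt : is_safe2_alt level = tryCandsB level [i - 1, i, i + 1] := by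
      simp [is_safe2_alt, hfv]
    have hA : is_safe2 level = isSafe2LoopA level (PySem.List.pyRange 0 (level.length : Int) 1) := by
      simp [is_safe2, hs]
    rw [hA, halt]
    have hiff : isSafe2LoopA level (PySem.List.pyRange 0 (level.length : Int) 1) = true ↔
        tryCandsB level [i - 1, i, i + 1] = true := by
      rw [loopA_iff, cands_iff]
      constructor
      · rintro ⟨x, hx, hsafe⟩
        obtain ⟨hx0, hxlt⟩ := PySem.List.mem_pyRange_one.mp hx
        rw [erased_eq level x hx0] at hsafe
        have hnone : firstViolationB (level.take x.toNat ++ level.drop (x.toNat + 1)) = none := by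
          rw [fv_none_iff]
          exact (safeA_iff _).mp hsafe
        have hnear : ¬ (x < i - 1 ∨ i + 1 < x) := by
          intro hfar
          exact main_far level i x hfv hx0 hxlt hfar ((fv_none_iff _).mp hnone)
        push Not at hnear
        have hmem : x ∈ [i - 1, i, i + 1] := by
          simp only [List.mem_cons]
          omega
        refine ⟨x, hmem, hx0, hxlt, ?_⟩
        rw [erased_eq level x hx0]
        exact hnone
      · rintro ⟨jc, hmem, hj0, hjlt, hnone⟩
        refine ⟨jc, PySem.List.mem_pyRange_one.mpr ⟨hj0, hjlt⟩, ?_⟩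
        rw [safeA_eq_fv]
        exact hnone
    cases h1 : isSafe2LoopA level (PySem.List.pyRange 0 (level.length : Int) 1) <;>
      cases h2 : tryCandsB level [i - 1, i, i + 1] <;> simp_all
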